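-- pv_equiv track=rewrite | github.com/yuki-miyakawa/code-practice | python/others/maximum_frequency/maximum_frequency.py | maximum_frequency
-- ===== SOURCE A (Python) =====
-- from typing import List
-- from collections import defaultdict
--
-- def maximum_frequency(nums: List[int]) -> int:
--     freq_map = defaultdict(int)
--     ans = 0
--     for i in range(len(nums) - 1):
--         diff = abs(nums[i] - nums[i + 1])
--         freq_map[diff] += 1
--         ans = max(ans, freq_map[diff])
--     return ans
-- ===== SOURCE B (Python) =====
-- from typing import List
--
-- def maximum_frequency(nums: List[int]) -> int:
--     diffs = sorted(abs(a - b) for a, b in zip(nums, nums[1:]))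
--     best = 0
--     run = 0
--     prev = None
--     for d in diffs:
--         run = run + 1 if d == prev else 1
--         if run > best:
--             best = run
--         prev = d
--     return best
-- ===== Notes on version B (the rewrite author's own statement) =====
-- stated objective: alternative
-- what changed: Replaces A's single-pass defaultdict counting with a running max by a sort-then-scan algorithm: sort the adjacent absolute differences and return the length of the longest run of equal consecutive values, tracked with (best, run, prev) and no map at all.
import Mathlib
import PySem

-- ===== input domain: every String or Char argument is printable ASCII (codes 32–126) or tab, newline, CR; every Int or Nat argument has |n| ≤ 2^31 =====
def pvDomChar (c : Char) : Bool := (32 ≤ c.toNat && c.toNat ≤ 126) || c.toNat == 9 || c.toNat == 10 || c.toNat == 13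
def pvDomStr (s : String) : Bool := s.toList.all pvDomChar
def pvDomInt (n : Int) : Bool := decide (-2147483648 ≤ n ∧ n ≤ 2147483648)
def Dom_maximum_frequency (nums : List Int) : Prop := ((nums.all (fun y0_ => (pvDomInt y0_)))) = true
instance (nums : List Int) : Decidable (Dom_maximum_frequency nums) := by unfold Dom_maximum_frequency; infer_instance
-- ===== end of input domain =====

-- B replaces A's hash-map counting with a sort-then-scan algorithm: sort the adjacent
-- absolute differences and return the length of the longest run of equal neighbours
-- (alternative algorithm; O(n log n) instead of O(n), no map at all).


-- ===== PORT A =====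
-- for i in range(len(nums)-1): diff = abs(nums[i]-nums[i+1]); freq_map[diff] += 1; ans = max(ans, freq_map[diff])
-- nums[i] / nums[i+1] ported with pyGetD: i ranges over 0..len-2, so both indices are always
-- in range and the port is exact; the defaultdict(int) increment is Dict.modify diff 0 (·+1).
def maximum_frequency (nums : List Int) : Int :=
  let s := (PySem.List.pyRange 0 (PySem.List.len nums - 1) 1).foldl
    (fun (st : PySem.Dict Int Int × Int) i =>
      let diff := |PySem.List.pyGetD nums i 0 - PySem.List.pyGetD nums (i + 1) 0|
      let fm := st.1.modify diff 0 (· + 1)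
      (fm, max st.2 (fm.getD diff 0)))
    (PySem.Dict.empty, 0)
  s.2

-- ===== PORT B =====
-- diffs = sorted(abs(a-b) for a,b in zip(nums, nums[1:])); then one scan keeping
-- (best, run, prev): run = run+1 if d == prev else 1, best updated when run > best.
def mfStep (st : Int × Int × Option Int) (d : Int) : Int × Int × Option Int :=
  let run := if some d = st.2.2 then st.2.1 + 1 else 1
  let best := if run > st.1 then run else st.1
  (best, run, some d)

def maximum_frequency_alt (nums : List Int) : Int :=
  let diffs := PySem.List.sorted
    ((nums.zip (PySem.List.slice nums (some 1) none)).map (fun p => |p.1 - p.2|))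
    (fun x => x) false
  (diffs.foldl mfStep (0, 0, none)).1

-- ===== PRECONDITION & SPEC =====
def Spec_maximum_frequency (nums : List Int) (out : Int) : Prop := out = maximum_frequency_alt nums
instance (nums : List Int) (out : Int) : Decidable (Spec_maximum_frequency nums out) := by unfold Spec_maximum_frequency; infer_instance

-- ===== CLAIM (what is proved, stated in full; the proofs are below) =====
def Claim_equal_maximum_frequency : Prop := ∀ (nums : List Int), Dom_maximum_frequency nums → Spec_maximum_frequency nums (maximum_frequency nums)

-- ===== LEMMAS AND PROOFS =====

-- A's loop body, as a fold step over the difference values themselves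
def pvStepA (st : PySem.Dict Int Int × Int) (x : Int) : PySem.Dict Int Int × Int :=
  let fm := st.1.modify x 0 (· + 1)
  (fm, max st.2 (fm.getD x 0))

-- the dict component of A's fold ignores the running max
theorem pvStepA_fst (ds : List Int) (d : PySem.Dict Int Int) (a : Int) :
    (ds.foldl pvStepA (d, a)).1 = ds.foldl (fun d x => d.modify x 0 (· + 1)) d := by
  induction ds generalizing d a with
  | nil => rfl
  | cons h t ih => simp [pvStepA, ih]

theorem pv_foldl_max_pull (l : List Int) (a b : Int) :
    l.foldl max (max a b) = max (l.foldl max a) b := by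
  induction l generalizing a with
  | nil => rfl
  | cons h t ih =>
    simp only [List.foldl_cons]
    rw [max_right_comm, ih]

-- max over the multiset of counts of ds (the common value both programs compute)
def pvV (ds : List Int) : Int :=
  ((PySem.Set.ofList ds).map (fun k => (ds.count k : Int))).foldl max 0

theorem pv_ofList_append_singleton (ds : List Int) (x : Int) :
    PySem.Set.ofList (ds ++ [x])
      = if x ∈ ds then PySem.Set.ofList ds else PySem.Set.ofList ds ++ [x] := by
  rw [PySem.Set.ofList_append, PySem.Set.update_cons, PySem.Set.update_nil]
  unfold PySem.Set.add
  simp [PySem.Set.mem_ofList]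

theorem pvV_append (ds : List Int) (x : Int) :
    pvV (ds ++ [x]) = max (pvV ds) ((ds.count x : Int) + 1) := by
  unfold pvV
  rw [pv_ofList_append_singleton]
  by_cases hx : x ∈ ds
  · simp only [hx, if_true]
    obtain ⟨l1, l2, hsplit⟩ := List.append_of_mem ((PySem.Set.mem_ofList ds x).mpr hx)
    have hnd := PySem.Set.nodup_ofList ds
    rw [hsplit] at hnd
    have hxnot : x ∉ l1 ++ l2 := (List.nodup_cons.mp (List.nodup_middle.mp hnd)).1
    rw [hsplit]
    have hcong : ∀ (l : List Int), x ∉ l →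
        l.map (fun k => ((ds ++ [x]).count k : Int)) = l.map (fun k => (ds.count k : Int)) := by
      intro l hl
      apply List.map_congr_left
      intro k hk
      have : k ≠ x := fun h => hl (h ▸ hk)
      simp [List.count_append, Ne.symm this]
    have h1 : x ∉ l1 := fun h => hxnot (List.mem_append.mpr (Or.inl h))
    have h2 : x ∉ l2 := fun h => hxnot (List.mem_append.mpr (Or.inr h))
    have hcx : ((ds ++ [x]).count x : Int) = (ds.count x : Int) + 1 := by
      simp [List.count_append]
    simp only [List.map_append, List.map_cons, hcong l1 h1, hcong l2 h2, hcx]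
    rw [List.foldl_append, List.foldl_append, List.foldl_cons, List.foldl_cons]
    rw [pv_foldl_max_pull, pv_foldl_max_pull, max_assoc,
      max_eq_right (by omega : (ds.count x : Int) ≤ (ds.count x : Int) + 1)]
  · simp only [hx, if_false]
    have hcong : (PySem.Set.ofList ds).map (fun k => ((ds ++ [x]).count k : Int))
        = (PySem.Set.ofList ds).map (fun k => (ds.count k : Int)) := by
      apply List.map_congr_left
      intro k hk
      have : k ≠ x := fun h => hx (h ▸ (PySem.Set.mem_ofList ds k).mp hk)
      simp [List.count_append, Ne.symm this]
    have hcx : ((ds ++ [x]).count x : Int) = (ds.count x : Int) + 1 := by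
      simp [List.count_append]
    rw [List.map_append, List.map_cons, List.map_nil, hcong,
      List.foldl_append, List.foldl_cons, List.foldl_nil, hcx]

-- A's running max equals the max count, by induction from the right
theorem pvA2_eq_pvV (ds : List Int) :
    (ds.foldl pvStepA (PySem.Dict.empty, 0)).2 = pvV ds := by
  induction ds using List.reverseRecOn with
  | nil => rfl
  | append_singleton t x ih =>
    rw [List.foldl_append, List.foldl_cons, List.foldl_nil]
    show (pvStepA (t.foldl pvStepA (PySem.Dict.empty, 0)) x).2 = _
    rw [pvV_append]
    simp only [pvStepA]
    rw [show (t.foldl pvStepA (PySem.Dict.empty, 0)).1 = PySem.Dict.counter t from by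
      rw [pvStepA_fst, PySem.Dict.counter_eq_foldl]]
    rw [show (PySem.Dict.counter t).modify x 0 (· + 1) = PySem.Dict.counter (t ++ [x]) from
      (PySem.Dict.counter_append_singleton t x).symm]
    rw [PySem.Dict.getD_counter, ih]
    simp [List.count_append]

-- the index-based diffs of A are the zip-based diffs of B
theorem pv_diffs_eq (nums : List Int) :
    (PySem.List.pyRange 0 (PySem.List.len nums - 1) 1).map
        (fun i => |PySem.List.pyGetD nums i 0 - PySem.List.pyGetD nums (i + 1) 0|)
      = (nums.zip nums.tail).map (fun p => |p.1 - p.2|) := by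
  apply List.ext_getElem
  · simp [PySem.List.length_pyRange_one]
  · intro k h1 h2
    simp only [List.getElem_map, PySem.List.getElem_pyRange_one, List.getElem_zip]
    have hk : k < nums.length - 1 := by
      simp [PySem.List.length_pyRange_one] at h1; omega
    have h0 : (0 : Int) + (k : Int) = ((k : Int)) := by omega
    rw [h0]
    have h1' : ((k : Int)) + 1 = ((k + 1 : Nat) : Int) := by push_cast; ring
    rw [h1']
    simp only [PySem.List.pyGetD_natCast]
    rw [List.getD_eq_getElem _ _ (by omega), List.getD_eq_getElem _ _ (by omega),
      List.getElem_tail]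

-- pvV is invariant under permutation of the list
theorem pvV_perm (l1 l2 : List Int) (h : l1.Perm l2) : pvV l1 = pvV l2 := by
  unfold pvV
  have hcnt : (PySem.Set.ofList l1).map (fun k => (l1.count k : Int))
      = (PySem.Set.ofList l1).map (fun k => (l2.count k : Int)) := by
    apply List.map_congr_left; intro k _; rw [h.count_eq]
  have hperm : (PySem.Set.ofList l1).Perm (PySem.Set.ofList l2) := by
    rw [List.perm_ext_iff_of_nodup (PySem.Set.nodup_ofList l1) (PySem.Set.nodup_ofList l2)]
    intro a
    rw [PySem.Set.mem_ofList, PySem.Set.mem_ofList]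
    exact h.mem_iff
  rw [hcnt]
  exact ((hperm.map _).foldl_eq' (fun x _ y _ z => max_right_comm z x y)) 0

theorem pv_if_max (a b : Int) : (if b > a then b else a) = max a b := by
  rw [max_def]; split_ifs <;> omega

-- the run-length scan over a sorted (Pairwise ≤) list: best = max count, and
-- prev is a maximum element of the prefix with run = its count
theorem pv_scan_sorted (S : List Int) (h : S.Pairwise (· ≤ ·)) :
    (S.foldl mfStep (0, 0, none)).1 = pvV S ∧
    (S = [] ∨ ∃ l, l ∈ S ∧ (∀ a ∈ S, a ≤ l) ∧
      (S.foldl mfStep (0, 0, none)).2.2 = some l ∧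
      (S.foldl mfStep (0, 0, none)).2.1 = (S.count l : Int)) := by
  induction S using List.reverseRecOn with
  | nil => exact ⟨rfl, Or.inl rfl⟩
  | append_singleton t x ih =>
    have hp := List.pairwise_append.mp h
    have ht : t.Pairwise (· ≤ ·) := hp.1
    have hle : ∀ a ∈ t, a ≤ x := by
      intro a ha; exact hp.2.2 a ha x (List.mem_singleton_self x)
    obtain ⟨hb, hc⟩ := ih ht
    rw [List.foldl_append, List.foldl_cons, List.foldl_nil]
    rcases hc with hnil | ⟨l, hlmem, hlmax, hprev, hrun⟩
    · subst hnil
      refine ⟨?_, Or.inr ⟨x, List.mem_singleton_self x, ?_, ?_, ?_⟩⟩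
      · show (mfStep (0, 0, none) x).1 = pvV ([] ++ [x])
        rw [pvV_append]
        simp [mfStep, pvV]
      · intro a ha; rw [List.nil_append, List.mem_singleton] at ha; omega
      · rfl
      · simp [mfStep]
    · by_cases hxl : x = l
      · subst hxl
        refine ⟨?_, Or.inr ⟨x, by simp, ?_, ?_, ?_⟩⟩
        · show (mfStep (t.foldl mfStep (0, 0, none)) x).1 = pvV (t ++ [x])
          rw [pvV_append]
          simp only [mfStep, hprev, hrun, hb, pv_if_max]
          simp
        · intro a ha
          rcases List.mem_append.mp ha with h1 | h1
          · exact hlmax a h1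
          · rw [List.mem_singleton] at h1; omega
        · simp [mfStep]
        · simp only [mfStep, hprev, hrun]
          push_cast [List.count_append]
          simp
      · have hxnot : x ∉ t := fun hx => hxl (le_antisymm (hle l hlmem) (hlmax x hx)).symm
        have hif : (some x = (t.foldl mfStep (0, 0, none)).2.2) = False := by
          rw [hprev]; simp [hxl]
        refine ⟨?_, Or.inr ⟨x, by simp, ?_, ?_, ?_⟩⟩
        · show (mfStep (t.foldl mfStep (0, 0, none)) x).1 = pvV (t ++ [x])
          rw [pvV_append, List.count_eq_zero_of_not_mem hxnot]
          simp only [mfStep, hif, if_false, hb, pv_if_max]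
          norm_num
        · intro a ha
          rcases List.mem_append.mp ha with h1 | h1
          · exact hle a h1
          · rw [List.mem_singleton] at h1; omega
        · simp [mfStep]
        · simp only [mfStep, hif, if_false]
          rw [List.count_append, List.count_eq_zero_of_not_mem hxnot]
          simp

-- B's value is the max count of the zip-based diffs
theorem pv_alt_eq (nums : List Int) :
    maximum_frequency_alt nums = pvV ((nums.zip nums.tail).map (fun p => |p.1 - p.2|)) := by
  unfold maximum_frequency_alt
  rw [PySem.List.slice_from_one]
  set L := (nums.zip nums.tail).map (fun p => |p.1 - p.2|) with hL
  have hs := pv_scan_sorted (PySem.List.sorted L (fun x => x) false)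
    (by simpa using PySem.List.sorted_pairwise L (fun x => x))
  rw [hs.1]
  exact pvV_perm _ _ (PySem.List.sorted_perm L (fun x => x) false)

-- ===== VERDICT (by name: the statement is the Claim_ definition above) =====
theorem maximum_frequency_spec : Claim_equal_maximum_frequency := by
  intro nums _
  show maximum_frequency nums = maximum_frequency_alt nums
  rw [pv_alt_eq, maximum_frequency]
  have hfold : (PySem.List.pyRange 0 (PySem.List.len nums - 1) 1).foldl
      (fun (st : PySem.Dict Int Int × Int) i =>
        pvStepA st (|PySem.List.pyGetD nums i 0 - PySem.List.pyGetD nums (i + 1) 0|))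
      (PySem.Dict.empty, 0)
      = ((nums.zip nums.tail).map (fun p => |p.1 - p.2|)).foldl pvStepA
          (PySem.Dict.empty, 0) := by
    rw [← pv_diffs_eq, List.foldl_map]
  simp only [pvStepA] at hfold
  rw [hfold]
  exact pvA2_eq_pvV _
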